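-- pv_equiv track=rewrite | github.com/SwaroopVennapusa/Advance_DSA | Assign2/assignment_2.py | find_significant_energy_increase_brute
-- ===== SOURCE A (Python) =====
-- def find_significant_energy_increase_brute(A):
--
--     if not A or A.count(A[0]) == len(A):
--         return (None, None)
--
--     if len(A) == 2:
--         return (0, 1)
--
--     max_increase = float('-inf')
--     result = (0, 1)
--
--     for i in range(len(A)):
--         for j in range(i+1, len(A)):
--             increase = A[j] - A[i]
--             if increase > max_increase:
--                 max_increase = increase
--                 result = (i, j)
--
--     return result
-- ===== SOURCE B (Python) =====
-- def find_significant_energy_increase_brute(A):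
--     if not A or all(x == A[0] for x in A):
--         return (None, None)
--     best = None
--     result = None
--     min_val = A[0]
--     min_idx = 0
--     for j in range(1, len(A)):
--         inc = A[j] - min_val
--         if best is None or inc > best:
--             best = inc
--             result = (min_idx, j)
--         if A[j] < min_val:
--             min_val = A[j]
--             min_idx = j
--     return result
-- ===== Notes on version B (the rewrite author's own statement) =====
-- stated objective: faster
-- what changed: Replaced A's O(n^2) scan over all index pairs (i,j) with a single O(n) pass that tracks the running minimum value and its earliest index, updating the best increase on strict improvement only.
import Mathlib
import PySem

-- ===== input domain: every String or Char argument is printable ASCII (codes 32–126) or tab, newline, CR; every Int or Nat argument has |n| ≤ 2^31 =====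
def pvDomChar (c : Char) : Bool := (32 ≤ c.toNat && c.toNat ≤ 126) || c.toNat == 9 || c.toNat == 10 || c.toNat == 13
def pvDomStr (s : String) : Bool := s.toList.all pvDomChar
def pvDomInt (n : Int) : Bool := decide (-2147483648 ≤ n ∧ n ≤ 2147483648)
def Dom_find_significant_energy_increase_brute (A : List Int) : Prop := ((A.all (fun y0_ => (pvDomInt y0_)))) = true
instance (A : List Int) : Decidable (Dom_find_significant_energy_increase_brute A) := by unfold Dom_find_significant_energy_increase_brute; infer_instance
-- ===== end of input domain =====

-- B replaces A's O(n^2) scan over all index pairs by a single O(n) pass tracking the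
-- running minimum value and its earliest index (same return value everywhere).

-- ===== PORT A =====
def find_significant_energy_increase_brute (A : List Int) : Option Int × Option Int :=
  if A = [] ∨ PySem.List.count A (PySem.List.pyGetD A 0 0) = A.length then (none, none)
  else if A.length = 2 then (some 0, some 1)
  else
    let st := (PySem.List.pyRange 0 (A.length : Int)).foldl
      (fun st i => (PySem.List.pyRange (i + 1) (A.length : Int)).foldl
        (fun st j =>
          let inc := PySem.List.pyGetD A j 0 - PySem.List.pyGetD A i 0
          match st.1 with
          | none => (some inc, (i, j))
          | some m => if m < inc then (some inc, (i, j)) else st)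
        st)
      ((none : Option Int), ((0 : Int), (1 : Int)))
    (some st.2.1, some st.2.2)

-- ===== PORT B =====
def find_significant_energy_increase_brute_alt (A : List Int) : Option Int × Option Int :=
  match A with
  | [] => (none, none)
  | a :: t =>
    if (a :: t).all (fun x => x == a) then (none, none)
    else
      let st := (PySem.List.pyRange 1 ((a :: t).length : Int)).foldl
        (fun s j =>
          let inc := PySem.List.pyGetD (a :: t) j 0 - s.2.2.1
          let s' := match s.1 with
            | none => (some inc, some (s.2.2.2, j), s.2.2)
            | some b => if b < inc then (some inc, some (s.2.2.2, j), s.2.2) else s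
          if PySem.List.pyGetD (a :: t) j 0 < s'.2.2.1 then
            (s'.1, s'.2.1, PySem.List.pyGetD (a :: t) j 0, j)
          else s')
        ((none : Option Int), (none : Option (Int × Int)), a, (0 : Int))
      match st.2.1 with
      | some (i, j) => (some i, some j)
      | none => (none, none)

-- ===== PRECONDITION & SPEC =====
def Spec_find_significant_energy_increase_brute (A : List Int) (out : Option Int × Option Int) : Prop := out = find_significant_energy_increase_brute_alt A
instance (A : List Int) (out : Option Int × Option Int) : Decidable (Spec_find_significant_energy_increase_brute A out) := by unfold Spec_find_significant_energy_increase_brute; infer_instance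

-- ===== CLAIM (what is proved, stated in full; the proofs are below) =====
def Claim_equal_find_significant_energy_increase_brute : Prop := ∀ (A : List Int), Dom_find_significant_energy_increase_brute A → Spec_find_significant_energy_increase_brute A (find_significant_energy_increase_brute A)

-- ===== LEMMAS AND PROOFS =====

-- A[i] for the in-range indices both loops produce
def gI (A : List Int) (i : Int) : Int := PySem.List.pyGetD A i 0

-- the common "keep the first strict maximum" step, on (value, i, j) triples
def fmStep (s : Option (Int × Int × Int)) (p : Int × Int × Int) : Option (Int × Int × Int) :=
  match s with
  | none => some p
  | some q => if q.1 < p.1 then some p else some q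

-- the pair list A's double loop scans, in its scan order (lexicographic)
def LA (A : List Int) : List (Int × Int × Int) :=
  (PySem.List.pyRange 0 (A.length : Int)).flatMap
    (fun i => (PySem.List.pyRange (i + 1) (A.length : Int)).map
      (fun j => (gI A j - gI A i, i, j)))

-- prefix minimum value / earliest prefix-argmin over A[0..k]
def pm (A : List Int) : Nat → Int
  | 0 => gI A 0
  | k + 1 => if gI A ((k : Int) + 1) < pm A k then gI A ((k : Int) + 1) else pm A k

def pmIdx (A : List Int) : Nat → Nat
  | 0 => 0
  | k + 1 => if gI A ((k : Int) + 1) < pm A k then k + 1 else pmIdx A k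

-- the candidate list B's single pass scans
def LB (A : List Int) : List (Int × Int × Int) :=
  (List.range' 1 (A.length - 1)).map
    (fun (j : Nat) => (gI A (j : Int) - pm A (j - 1), ((pmIdx A (j - 1) : Int)), (j : Int)))

-- every nonempty list has a "first strict maximum" decomposition, and the fold finds it
lemma fmStep_firstmax (l : List (Int × Int × Int)) (h : l ≠ []) :
    ∃ l₁ r l₂, l = l₁ ++ r :: l₂ ∧ (∀ y ∈ l₁, y.1 < r.1) ∧ (∀ y ∈ l₂, y.1 ≤ r.1) ∧
      l.foldl fmStep none = some r := by
  induction l using List.reverseRecOn with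
  | nil => exact absurd rfl h
  | append_singleton l x ih =>
    rcases eq_or_ne l [] with hl | hl
    · subst hl
      exact ⟨[], x, [], by simp, by simp, by simp, by simp [fmStep]⟩
    · obtain ⟨l₁, r, l₂, hdec, h₁, h₂, hfold⟩ := ih hl
      by_cases hx : r.1 < x.1
      · refine ⟨l, x, [], by simp, ?_, by simp, ?_⟩
        · intro y hy
          rw [hdec] at hy
          rcases List.mem_append.mp hy with hy | hy
          · exact lt_trans (h₁ y hy) hx
          · rcases List.mem_cons.mp hy with hy | hy
            · exact hy ▸ hx
            · exact lt_of_le_of_lt (h₂ y hy) hx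
        · rw [List.foldl_append, hfold]; simp [fmStep, hx]
      · refine ⟨l₁, r, l₂ ++ [x], by rw [hdec]; simp, h₁, ?_, ?_⟩
        · intro y hy
          rcases List.mem_append.mp hy with hy | hy
          · exact h₂ y hy
          · simp only [List.mem_singleton] at hy; subst hy; omega
        · rw [List.foldl_append, hfold]; simp [fmStep, hx]


-- pyRange with step 1 is strictly increasing
lemma pyRange_one_nil {a b : Int} (h : b ≤ a) : PySem.List.pyRange a b = [] := by
  refine List.eq_nil_iff_forall_not_mem.mpr ?_
  intro x hx
  have := PySem.List.mem_pyRange_one.mp hx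
  omega

lemma pyRange_one_pairwise (a b : Int) : (PySem.List.pyRange a b).Pairwise (· < ·) := by
  have H : ∀ m : Nat, ∀ a : Int, b - a ≤ (m : Int) → (PySem.List.pyRange a b).Pairwise (· < ·) := by
    intro m
    induction m with
    | zero => intro a ha; rw [pyRange_one_nil (by omega)]; exact List.Pairwise.nil
    | succ m ih =>
      intro a ha
      by_cases hab : a < b
      · rw [PySem.List.pyRange_one_cons hab]
        refine List.Pairwise.cons ?_ (ih (a + 1) (by omega))
        intro x hx
        have := PySem.List.mem_pyRange_one.mp hx
        omega
      · rw [pyRange_one_nil (by omega)]; exact List.Pairwise.nil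
  exact H (b - a).toNat a (by omega)


lemma mem_LA {A : List Int} {x : Int × Int × Int} :
    x ∈ LA A ↔ ∃ i j : Int, 0 ≤ i ∧ i < j ∧ j < (A.length : Int) ∧ x = (gI A j - gI A i, i, j) := by
  simp only [LA, List.mem_flatMap, List.mem_map, PySem.List.mem_pyRange_one]
  constructor
  · rintro ⟨i, ⟨hi0, hin⟩, j, ⟨hj1, hjn⟩, rfl⟩
    exact ⟨i, j, hi0, by omega, hjn, rfl⟩
  · rintro ⟨i, j, hi0, hij, hjn, rfl⟩
    exact ⟨i, ⟨hi0, by omega⟩, j, ⟨by omega, hjn⟩, rfl⟩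


lemma pairwise_LA (A : List Int) :
    (LA A).Pairwise (fun x y => x.2.1 < y.2.1 ∨ (x.2.1 = y.2.1 ∧ x.2.2 < y.2.2)) := by
  rw [LA, List.pairwise_flatMap]
  constructor
  · intro i _
    rw [List.pairwise_map]
    exact (pyRange_one_pairwise _ _).imp (fun h => Or.inr ⟨rfl, h⟩)
  · refine (pyRange_one_pairwise _ _).imp ?_
    rintro i i' hii' x hx y hy
    simp only [List.mem_map] at hx hy
    obtain ⟨j, -, rfl⟩ := hx
    obtain ⟨j', -, rfl⟩ := hy
    exact Or.inl hii'


lemma pairwise_LB (A : List Int) : (LB A).Pairwise (fun x y => x.2.2 < y.2.2) := by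
  rw [LB, List.pairwise_map]
  exact (List.pairwise_lt_range' 1).imp (fun h => by dsimp only; exact_mod_cast h)


lemma mem_LB {A : List Int} {x : Int × Int × Int} :
    x ∈ LB A ↔ ∃ j : Nat, 1 ≤ j ∧ j < A.length ∧
      x = (gI A (j : Int) - pm A (j - 1), ((pmIdx A (j - 1) : Int)), (j : Int)) := by
  simp only [LB, List.mem_map, List.mem_range'_1]
  constructor
  · rintro ⟨j, ⟨hj1, hjn⟩, rfl⟩
    exact ⟨j, hj1, by omega, rfl⟩
  · rintro ⟨j, hj1, hjn, rfl⟩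
    exact ⟨j, ⟨hj1, by omega⟩, rfl⟩


lemma pm_le (A : List Int) (k t : Nat) (ht : t ≤ k) : pm A k ≤ gI A (t : Int) := by
  induction k with
  | zero => interval_cases t; exact le_refl _
  | succ k ih =>
    rcases Nat.lt_succ_iff_lt_or_eq.mp (Nat.lt_succ_of_le ht) with h | h
    · have := ih (by omega)
      unfold pm; split <;> omega
    · subst h
      unfold pm; push_cast; split <;> omega


lemma pmIdx_le (A : List Int) (k : Nat) : pmIdx A k ≤ k := by
  induction k with
  | zero => exact le_refl _
  | succ k ih => unfold pmIdx; split <;> omega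


lemma gI_pmIdx (A : List Int) (k : Nat) : gI A ((pmIdx A k : Nat) : Int) = pm A k := by
  induction k with
  | zero => rfl
  | succ k ih =>
    by_cases hc : gI A ((k : Int) + 1) < pm A k
    · simp only [pmIdx, pm, hc, if_true]; push_cast; rfl
    · simp only [pmIdx, pm, hc, if_false]; exact ih


lemma pm_lt_of_lt_pmIdx (A : List Int) (k t : Nat) (ht : t < pmIdx A k) :
    pm A k < gI A (t : Int) := by
  induction k with
  | zero => simp [pmIdx] at ht
  | succ k ih =>
    by_cases hc : gI A ((k : Int) + 1) < pm A k
    · simp only [pmIdx, hc, if_true] at ht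
      simp only [pm, hc, if_true]
      have h1 : pm A k ≤ gI A (t : Int) := pm_le A k t (by omega)
      omega
    · simp only [pmIdx, hc, if_false] at ht
      simp only [pm, hc, if_false]
      exact ih ht


-- the heart: the first strict maximum of A's pair list and of B's candidate list coincide
lemma firstmax_LA_eq_LB (A : List Int) (h2 : 2 ≤ A.length) :
    (LA A).foldl fmStep none = (LB A).foldl fmStep none := by
  have hmemA0 : ((gI A 1 - gI A 0, (0 : Int), (1 : Int)) : Int × Int × Int) ∈ LA A :=
    mem_LA.mpr ⟨0, 1, le_refl 0, by norm_num, by omega, rfl⟩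
  have hmemB0 : (gI A ((1 : Nat) : Int) - pm A 0, ((pmIdx A 0 : Int)), ((1 : Nat) : Int)) ∈ LB A :=
    mem_LB.mpr ⟨1, le_refl 1, by omega, rfl⟩
  obtain ⟨a₁, rA, a₂, hAdec, hA1, hA2, hAfold⟩ :=
    fmStep_firstmax (LA A) (List.ne_nil_of_mem hmemA0)
  obtain ⟨b₁, rB, b₂, hBdec, hB1, hB2, hBfold⟩ :=
    fmStep_firstmax (LB A) (List.ne_nil_of_mem hmemB0)
  rw [hAfold, hBfold]
  suffices h : rA = rB by rw [h]
  have hrA_mem : rA ∈ LA A := by rw [hAdec]; exact List.mem_append_right _ (List.mem_cons_self ..)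
  obtain ⟨i1, j1, hi1, hij1, hj1n, hrAeq⟩ := mem_LA.mp hrA_mem
  have hrB_mem : rB ∈ LB A := by rw [hBdec]; exact List.mem_append_right _ (List.mem_cons_self ..)
  obtain ⟨j2, hj21, hj2n, hrBeq⟩ := mem_LB.mp hrB_mem
  have hrA1 : rA.1 = gI A j1 - gI A i1 := by rw [hrAeq]
  have hrA2 : rA.2.1 = i1 := by rw [hrAeq]
  have hrA3 : rA.2.2 = j1 := by rw [hrAeq]
  have hrB1 : rB.1 = gI A ((j2 : Nat) : Int) - pm A (j2 - 1) := by rw [hrBeq]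
  have hrB2 : rB.2.1 = ((pmIdx A (j2 - 1) : Nat) : Int) := by rw [hrBeq]
  have hrB3 : rB.2.2 = ((j2 : Nat) : Int) := by rw [hrBeq]
  -- maximality of rA over all pairs
  have MA' : ∀ i j : Int, 0 ≤ i → i < j → j < (A.length : Int) → gI A j - gI A i ≤ rA.1 := by
    intro i j h1 h2' h3
    have hx : ((gI A j - gI A i, i, j) : Int × Int × Int) ∈ LA A :=
      mem_LA.mpr ⟨i, j, h1, h2', h3, rfl⟩
    rw [hAdec] at hx
    rcases List.mem_append.mp hx with hx | hx
    · exact le_of_lt (hA1 _ hx)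
    · rcases List.mem_cons.mp hx with heq | hx
      · exact le_of_eq (congrArg Prod.fst heq)
      · exact hA2 _ hx
  -- strict firstness of rA over lexicographically smaller pairs
  have pwA := pairwise_LA A
  rw [hAdec, List.pairwise_append] at pwA
  have hA2lex : ∀ x ∈ a₂, rA.2.1 < x.2.1 ∨ (rA.2.1 = x.2.1 ∧ rA.2.2 < x.2.2) :=
    fun x hx => (List.pairwise_cons.mp pwA.2.1).1 x hx
  have FA' : ∀ i j : Int, 0 ≤ i → i < j → j < (A.length : Int) →
      (i < i1 ∨ (i = i1 ∧ j < j1)) → gI A j - gI A i < rA.1 := by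
    intro i j h1 h2' h3 hlex
    have hx : ((gI A j - gI A i, i, j) : Int × Int × Int) ∈ LA A :=
      mem_LA.mpr ⟨i, j, h1, h2', h3, rfl⟩
    rw [hAdec] at hx
    rcases List.mem_append.mp hx with hx | hx
    · exact hA1 _ hx
    · rcases List.mem_cons.mp hx with heq | hx
      · exfalso
        rw [hrAeq] at heq
        simp only [Prod.mk.injEq] at heq
        omega
      · exfalso
        have hcmp := hA2lex _ hx
        simp only [hrA2, hrA3] at hcmp
        omega
  -- maximality of rB over B's candidates
  have MB' : ∀ j : Nat, 1 ≤ j → j < A.length →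
      gI A (j : Int) - pm A (j - 1) ≤ rB.1 := by
    intro j hj1 hjn
    have hx : ((gI A (j : Int) - pm A (j - 1), ((pmIdx A (j - 1) : Int)), (j : Int)) :
        Int × Int × Int) ∈ LB A := mem_LB.mpr ⟨j, hj1, hjn, rfl⟩
    rw [hBdec] at hx
    rcases List.mem_append.mp hx with hx | hx
    · exact le_of_lt (hB1 _ hx)
    · rcases List.mem_cons.mp hx with heq | hx
      · exact le_of_eq (congrArg Prod.fst heq)
      · exact hB2 _ hx
  -- strict firstness of rB over earlier candidates
  have pwB := pairwise_LB A
  rw [hBdec, List.pairwise_append] at pwB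
  have hB2lt : ∀ x ∈ b₂, rB.2.2 < x.2.2 := fun x hx => (List.pairwise_cons.mp pwB.2.1).1 x hx
  have FB' : ∀ j : Nat, 1 ≤ j → j < A.length → (j : Int) < rB.2.2 →
      gI A (j : Int) - pm A (j - 1) < rB.1 := by
    intro j hj1 hjn hlt
    have hx : ((gI A (j : Int) - pm A (j - 1), ((pmIdx A (j - 1) : Int)), (j : Int)) :
        Int × Int × Int) ∈ LB A := mem_LB.mpr ⟨j, hj1, hjn, rfl⟩
    rw [hBdec] at hx
    rcases List.mem_append.mp hx with hx | hx
    · exact hB1 _ hx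
    · rcases List.mem_cons.mp hx with heq | hx
      · exfalso
        rw [← heq] at hlt
        dsimp only at hlt
        omega
      · exfalso
        have := hB2lt _ hx
        dsimp only at this
        omega
  -- bookkeeping about the prefix minimum at j2
  have hpmIdx_le : pmIdx A (j2 - 1) ≤ j2 - 1 := pmIdx_le A (j2 - 1)
  have hgpm : gI A ((pmIdx A (j2 - 1) : Nat) : Int) = pm A (j2 - 1) := gI_pmIdx A (j2 - 1)
  -- value equality
  have hi1c : ((i1.toNat : Nat) : Int) = i1 := Int.toNat_of_nonneg hi1
  have hj1pos : (1 : Int) ≤ j1 := by omega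
  have hj1c : ((j1.toNat : Nat) : Int) = j1 := Int.toNat_of_nonneg (by omega)
  have hv1 : rB.1 ≤ rA.1 := by
    have h3 := MA' ((pmIdx A (j2 - 1) : Nat) : Int) ((j2 : Nat) : Int)
      (by omega) (by omega) (by omega)
    rw [hgpm] at h3
    omega
  have hpmle_i1 : pm A (j1.toNat - 1) ≤ gI A i1 := by
    have := pm_le A (j1.toNat - 1) i1.toNat (by omega)
    rwa [hi1c] at this
  have hv2 : rA.1 ≤ rB.1 := by
    have h5 := MB' j1.toNat (by omega) (by omega)
    rw [hj1c] at h5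
    omega
  -- the second components agree
  have hj : ((j2 : Nat) : Int) = j1 := by
    rcases lt_trichotomy ((j2 : Nat) : Int) j1 with hcase | hcase | hcase
    · exfalso
      by_cases hii : i1 < ((pmIdx A (j2 - 1) : Nat) : Int)
      · have h1 : i1.toNat < pmIdx A (j2 - 1) := by omega
        have h2 := pm_lt_of_lt_pmIdx A (j2 - 1) i1.toNat h1
        rw [hi1c] at h2
        have h3 := MA' ((pmIdx A (j2 - 1) : Nat) : Int) j1 (by omega) (by omega) hj1n
        rw [hgpm] at h3
        omega
      · have h4 := FA' ((pmIdx A (j2 - 1) : Nat) : Int) ((j2 : Nat) : Int)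
          (by omega) (by omega) (by omega) (by omega)
        rw [hgpm] at h4
        omega
    · exact hcase
    · exfalso
      have h5 := FB' j1.toNat (by omega) (by omega) (by omega)
      rw [hj1c] at h5
      omega
  -- the value and the first component agree
  have hgj : gI A ((j2 : Nat) : Int) = gI A j1 := by rw [hj]
  have hgi : gI A i1 = pm A (j2 - 1) := by omega
  have hi : i1 = ((pmIdx A (j2 - 1) : Nat) : Int) := by
    rcases lt_trichotomy i1 ((pmIdx A (j2 - 1) : Nat) : Int) with hii | hii | hii
    · exfalso
      have h1 : i1.toNat < pmIdx A (j2 - 1) := by omega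
      have h2 := pm_lt_of_lt_pmIdx A (j2 - 1) i1.toNat h1
      rw [hi1c] at h2
      omega
    · exact hii
    · exfalso
      have h4 := FA' ((pmIdx A (j2 - 1) : Nat) : Int) j1 (by omega) (by omega) hj1n
        (by omega)
      rw [hgpm] at h4
      omega
  rw [hrAeq, hrBeq, Prod.mk.injEq, Prod.mk.injEq]
  refine ⟨by omega, by omega, by omega⟩

-- the state shape of A's loop, as the image of the fmStep fold state
def phiA : Option (Int × Int × Int) → Option Int × (Int × Int) :=
  fun s => match s with
  | none => (none, (0, 1))
  | some q => (some q.1, (q.2.1, q.2.2))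

lemma homInnerA (A : List Int) (i : Int) (l : List Int) :
    ∀ (s : Option (Int × Int × Int)),
      l.foldl (fun st j =>
          let inc := PySem.List.pyGetD A j 0 - PySem.List.pyGetD A i 0
          match st.1 with
          | none => (some inc, (i, j))
          | some m => if m < inc then (some inc, (i, j)) else st)
        (phiA s)
      = phiA (l.foldl (fun s j => fmStep s (gI A j - gI A i, i, j)) s) := by
  induction l with
  | nil => intro s; rfl
  | cons j l ih =>
    intro s
    rw [List.foldl_cons, List.foldl_cons]
    have hstep : (let inc := PySem.List.pyGetD A j 0 - PySem.List.pyGetD A i 0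
          match (phiA s).1 with
          | none => (some inc, (i, j))
          | some m => if m < inc then (some inc, (i, j)) else phiA s)
        = phiA (fmStep s (gI A j - gI A i, i, j)) := by
      cases s with
      | none => rfl
      | some q => dsimp only [phiA, fmStep, gI]; split_ifs <;> rfl
    rw [hstep]
    exact ih _

lemma homOuterA (A : List Int) (l : List Int) :
    ∀ (s : Option (Int × Int × Int)),
      l.foldl (fun st i => (PySem.List.pyRange (i + 1) (A.length : Int)).foldl
          (fun st j =>
            let inc := PySem.List.pyGetD A j 0 - PySem.List.pyGetD A i 0
            match st.1 with
            | none => (some inc, (i, j))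
            | some m => if m < inc then (some inc, (i, j)) else st)
          st)
        (phiA s)
      = phiA (l.foldl (fun acc i => (PySem.List.pyRange (i + 1) (A.length : Int)).foldl
          (fun s j => fmStep s (gI A j - gI A i, i, j)) acc) s) := by
  induction l with
  | nil => intro s; rfl
  | cons i l ih =>
    intro s
    rw [List.foldl_cons, List.foldl_cons]
    rw [homInnerA A i (PySem.List.pyRange (i + 1) (A.length : Int)) s]
    exact ih _

-- A's double loop is the fold of fmStep over LA, transported through the state shape
lemma bridgeA (A : List Int) :
    ((PySem.List.pyRange 0 (A.length : Int)).foldl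
      (fun st i => (PySem.List.pyRange (i + 1) (A.length : Int)).foldl
        (fun st j =>
          let inc := PySem.List.pyGetD A j 0 - PySem.List.pyGetD A i 0
          match st.1 with
          | none => (some inc, (i, j))
          | some m => if m < inc then (some inc, (i, j)) else st)
        st)
      ((none : Option Int), ((0 : Int), (1 : Int))))
    = (match (LA A).foldl fmStep none with
       | none => ((none : Option Int), ((0 : Int), (1 : Int)))
       | some q => (some q.1, (q.2.1, q.2.2))) := by
  have h0 : ((none : Option Int), ((0 : Int), (1 : Int))) = phiA none := rfl
  rw [h0, homOuterA A _ none, LA, List.foldl_flatMap]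
  simp only [List.foldl_map]
  cases ((PySem.List.pyRange 0 (A.length : Int)).foldl (fun acc i =>
    (PySem.List.pyRange (i + 1) (A.length : Int)).foldl
      (fun s j => fmStep s (gI A j - gI A i, i, j)) acc) none) <;> rfl

-- B's single pass is the fold of fmStep over LB, alongside the prefix-min bookkeeping
lemma bridgeB (a : Int) (t : List Int) (k : Nat) (hk : 1 ≤ k) :
    ((PySem.List.pyRange 1 (k : Int)).foldl
      (fun s j =>
        let inc := PySem.List.pyGetD (a :: t) j 0 - s.2.2.1
        let s' := match s.1 with
          | none => (some inc, some (s.2.2.2, j), s.2.2)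
          | some b => if b < inc then (some inc, some (s.2.2.2, j), s.2.2) else s
        if PySem.List.pyGetD (a :: t) j 0 < s'.2.2.1 then
          (s'.1, s'.2.1, PySem.List.pyGetD (a :: t) j 0, j)
        else s')
      ((none : Option Int), (none : Option (Int × Int)), a, (0 : Int)))
    = ((match ((List.range' 1 (k - 1)).map
          (fun (j : Nat) => (gI (a :: t) (j : Int) - pm (a :: t) (j - 1),
                     ((pmIdx (a :: t) (j - 1) : Int)), (j : Int)))).foldl fmStep none with
        | none => (none : Option Int)
        | some q => some q.1),
       (match ((List.range' 1 (k - 1)).map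
          (fun (j : Nat) => (gI (a :: t) (j : Int) - pm (a :: t) (j - 1),
                     ((pmIdx (a :: t) (j - 1) : Int)), (j : Int)))).foldl fmStep none with
        | none => (none : Option (Int × Int))
        | some q => some (q.2.1, q.2.2)),
       pm (a :: t) (k - 1), ((pmIdx (a :: t) (k - 1) : Nat) : Int)) := by
  induction k, hk using Nat.le_induction with
  | base =>
    rw [Nat.cast_one, pyRange_one_nil (le_refl 1)]
    simp [pm, pmIdx, gI, PySem.List.pyGetD_ofNat']
  | succ k hk ih =>
    have hc1 : ((k + 1 : Nat) : Int) = (k : Int) + 1 := by push_cast; ring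
    rw [hc1, PySem.List.pyRange_one_succ_right (by exact_mod_cast hk), List.foldl_append, ih]
    have hr : List.range' 1 (k + 1 - 1) = List.range' 1 (k - 1) ++ [k] := by
      have h2 : k + 1 - 1 = (k - 1) + 1 := by omega
      rw [h2, List.range'_concat]
      congr 2
      omega
    rw [hr, List.map_append, List.foldl_append]
    have hcast : ((k - 1 : Nat) : Int) + 1 = (k : Int) := by omega
    have hk1 : k = (k - 1) + 1 := by omega
    have hpm : pm (a :: t) k
        = if gI (a :: t) (k : Int) < pm (a :: t) (k - 1) then gI (a :: t) (k : Int)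
          else pm (a :: t) (k - 1) := by
      conv_lhs => rw [hk1]
      simp only [pm]
      rw [hcast]
    have hpmIdx : pmIdx (a :: t) k
        = if gI (a :: t) (k : Int) < pm (a :: t) (k - 1) then (k - 1) + 1
          else pmIdx (a :: t) (k - 1) := by
      conv_lhs => rw [hk1]
      simp only [pmIdx]
      rw [hcast]
    simp only [Nat.add_sub_cancel, List.map_cons, List.map_nil, List.foldl_cons, List.foldl_nil,
      hpm, hpmIdx]
    cases hF : ((List.range' 1 (k - 1)).map
        (fun (j : Nat) => (gI (a :: t) (j : Int) - pm (a :: t) (j - 1),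
          ((pmIdx (a :: t) (j - 1) : Int)), (j : Int)))).foldl fmStep none with
    | none =>
      dsimp only [fmStep, gI]
      split_ifs with h1
      all_goals simp
      all_goals omega
    | some q =>
      dsimp only [fmStep, gI]
      split_ifs with h1 h2 h2
      all_goals simp
      all_goals omega


-- ===== VERDICT (by name: the statement is the Claim_ definition above) =====
theorem find_significant_energy_increase_brute_spec : Claim_equal_find_significant_energy_increase_brute := by
  intro A _
  unfold Spec_find_significant_energy_increase_brute
  cases A with
  | nil => rfl
  | cons a t =>
    by_cases hall : ∀ x ∈ (a :: t), x = a
    · have ha0 : PySem.List.pyGetD (a :: t) 0 0 = a := PySem.List.pyGetD_ofNat' (a :: t) 0 0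
      have hcount : PySem.List.count (a :: t) a = (a :: t).length :=
        List.count_eq_length.mpr (fun b hb => (hall b hb).symm)
      have hguard : ((a :: t) = [] ∨
          PySem.List.count (a :: t) (PySem.List.pyGetD (a :: t) 0 0) = (a :: t).length) := by
        right; rw [ha0]; exact hcount
      have hallB : (a :: t).all (fun x => x == a) = true :=
        List.all_eq_true.mpr (fun x hx => beq_iff_eq.mpr (hall x hx))
      rw [find_significant_energy_increase_brute, if_pos hguard,
        find_significant_energy_increase_brute_alt, if_pos hallB]
    · have ha0 : PySem.List.pyGetD (a :: t) 0 0 = a := PySem.List.pyGetD_ofNat' (a :: t) 0 0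
      have hguard : ¬((a :: t) = [] ∨
          PySem.List.count (a :: t) (PySem.List.pyGetD (a :: t) 0 0) = (a :: t).length) := by
        rintro (h | h)
        · exact List.cons_ne_nil a t h
        · rw [ha0] at h
          exact hall (fun b hb => (List.count_eq_length.mp h b hb).symm)
      have hallB : ¬((a :: t).all (fun x => x == a) = true) := by
        intro h
        exact hall (fun x hx => beq_iff_eq.mp (List.all_eq_true.mp h x hx))
      have hlen : 2 ≤ (a :: t).length := by
        cases t with
        | nil =>
          exact absurd (fun x hx => by simpa using List.mem_singleton.mp (by simpa using hx)) hall
        | cons b t' => simp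
      rw [find_significant_energy_increase_brute, if_neg hguard,
        find_significant_energy_increase_brute_alt, if_neg hallB]
      by_cases hl2 : (a :: t).length = 2
      · rw [if_pos hl2]
        cases t with
        | nil => simp at hl2
        | cons b t' =>
          have ht' : t' = [] := by simpa using hl2
          subst ht'
          have h12 : PySem.List.pyRange 1 2 = [1] := by decide
          have hr2 : PySem.List.pyRange 1 (([a, b] : List Int).length : Int) = [1] := by
            norm_num [h12]
          rw [hr2, List.foldl_cons, List.foldl_nil]
          dsimp only [PySem.List.pyGetD_ofNat']
          split_ifs <;> rfl
      · rw [if_neg hl2]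
        have h3 : 3 ≤ (a :: t).length := by omega
        -- A side via bridgeA, B side via bridgeB, equal through firstmax_LA_eq_LB
        rw [bridgeA (a :: t), bridgeB a t (a :: t).length (by omega)]
        have hLB : ((List.range' 1 ((a :: t).length - 1)).map
            (fun (j : Nat) => (gI (a :: t) (j : Int) - pm (a :: t) (j - 1),
              ((pmIdx (a :: t) (j - 1) : Int)), (j : Int)))) = LB (a :: t) := rfl
        rw [hLB, ← firstmax_LA_eq_LB (a :: t) hlen]
        have hmem : ((gI (a :: t) 1 - gI (a :: t) 0, (0 : Int), (1 : Int)) : Int × Int × Int) ∈ LA (a :: t) := by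
          exact mem_LA.mpr ⟨0, 1, le_refl 0, by norm_num, by omega, rfl⟩
        obtain ⟨l₁, r, l₂, _, _, _, hfold⟩ :=
          fmStep_firstmax (LA (a :: t)) (List.ne_nil_of_mem hmem)
        rw [hfold]
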